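-- pv_equiv track=rewrite | github.com/Prit44421/ai-theory-algorithms | extra/movegen/eightpuzzle_move.py | prefer_corner_moves
-- ===== SOURCE A (Python) =====
-- ADJ_MOVES = [-3,3,-1,1]
--
-- def standard_moves(node):
--     children=[]
--     zero=-1
--     for i,v in enumerate(node):
--         if v==0:
--             zero=i
--             break
--     for mv in ADJ_MOVES:
--         nz=zero+mv
--         if 0<=nz<9:
--             if mv==-1 and zero%3==0:
--                 continue
--             if mv==1 and zero%3==2:
--                 continue
--             new=node[:]
--             new[zero],new[nz]=new[nz],new[zero]
--             children.append(new)
--     return children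
--
-- def prefer_corner_moves(node):
--     """Return standard moves ordered so resulting blank position corners come first."""
--     succs=standard_moves(node)
--     corners={0,2,6,8}
--     scored=[]
--     for s in succs:
--         blank=s.index(0)
--         score=0 if blank in corners else 1
--         scored.append((score,s))
--     scored.sort(key=lambda x:x[0])
--     return [s for _,s in scored]
-- ===== SOURCE B (Python) =====
-- ADJ_MOVES = [-3,3,-1,1]
--
-- def standard_moves(node):
--     children=[]
--     zero=-1
--     for i,v in enumerate(node):
--         if v==0:
--             zero=i
--             break
--     for mv in ADJ_MOVES:
--         nz=zero+mv
--         if 0<=nz<9: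
--             if mv==-1 and zero%3==0:
--                 continue
--             if mv==1 and zero%3==2:
--                 continue
--             new=node[:]
--             new[zero],new[nz]=new[nz],new[zero]
--             children.append(new)
--     return children
--
-- def prefer_corner_moves(node):
--     """Two-bucket partition: corner-blank successors first, others after, each in move order."""
--     corner, other = [], []
--     for s in standard_moves(node):
--         (corner if s.index(0) in (0, 2, 6, 8) else other).append(s)
--     return corner + other
-- ===== Notes on version B (the rewrite author's own statement) =====
-- stated objective: simpler
-- what changed: Replaced the score/tuple/stable-sort pipeline with a single two-bucket partition pass (corner-blank successors appended to one list, the rest to another, then concatenated), which preserves the stable-sort order without any sort or key tuples.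
import Mathlib
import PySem

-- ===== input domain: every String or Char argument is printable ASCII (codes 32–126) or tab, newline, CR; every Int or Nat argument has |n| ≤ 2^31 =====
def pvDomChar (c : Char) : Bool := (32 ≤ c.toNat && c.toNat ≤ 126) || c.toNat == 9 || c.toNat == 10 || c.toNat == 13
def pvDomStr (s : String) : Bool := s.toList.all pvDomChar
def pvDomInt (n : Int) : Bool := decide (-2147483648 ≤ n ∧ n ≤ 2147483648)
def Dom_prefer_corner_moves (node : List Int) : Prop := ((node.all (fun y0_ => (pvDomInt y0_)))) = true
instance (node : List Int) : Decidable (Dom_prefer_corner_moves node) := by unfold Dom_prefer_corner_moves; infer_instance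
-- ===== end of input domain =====

-- B replaces A's score/tuple/stable-sort pipeline with a single two-bucket partition pass
-- (corner-blank successors, then the rest), preserving order; objective: simpler.

-- ===== PORT A =====
-- shared module helpers (both Source A and Source B use ADJ_MOVES and standard_moves verbatim)
def ADJ_MOVES : List Int := [-3, 3, -1, 1]

-- the 'for i,v in enumerate(node): if v==0: zero=i; break' loop, with initial zero=-1
def pvFindZero : List Int → Int → Int
  | [], _ => -1
  | v :: rest, i => if v = 0 then i else pvFindZero rest (i + 1)

def standard_moves (node : List Int) : List (List Int) :=
  let zero := pvFindZero node 0
  ADJ_MOVES.foldl (fun children mv =>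
    let nz := zero + mv
    if 0 ≤ nz ∧ nz < 9 then
      if mv = -1 ∧ PySem.Int.mod zero 3 = 0 then children
      else if mv = 1 ∧ PySem.Int.mod zero 3 = 2 then children
      else
        -- new = node[:]; new[zero], new[nz] = new[nz], new[zero]
        -- (an out-of-range index is IndexError in Python; those inputs are outside Pre_)
        match PySem.List.pyGet? node zero, PySem.List.pyGet? node nz with
        | some a, some b =>
            children ++ [PySem.List.pySetD (PySem.List.pySetD node zero b) nz a]
        | _, _ => children
    else children) []

-- s.index(0); Python raises ValueError when 0 ∉ s — outside Pre_ (the -1 is never used there)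
def pvBlank (s : List Int) : Int :=
  match PySem.List.index? s 0 with
  | some k => (k : Int)
  | none => -1

def prefer_corner_moves (node : List Int) : List (List Int) :=
  let succs := standard_moves node
  let corners : PySem.Set Int := PySem.Set.ofList [0, 2, 6, 8]
  let scored := succs.foldl (fun acc s =>
    let blank := pvBlank s
    let score : Int := if blank ∈ corners then 0 else 1
    acc ++ [(score, s)]) []
  (PySem.List.sorted scored (fun x => x.1) false).map (fun x => x.2)

-- ===== PORT B =====
def prefer_corner_moves_alt (node : List Int) : List (List Int) :=
  let r := (standard_moves node).foldl
    (fun (acc : List (List Int) × List (List Int)) s =>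
      if pvBlank s = 0 ∨ pvBlank s = 2 ∨ pvBlank s = 6 ∨ pvBlank s = 8
      then (acc.1 ++ [s], acc.2)
      else (acc.1, acc.2 ++ [s])) ([], [])
  r.1 ++ r.2

-- ===== PRECONDITION & SPEC =====
-- Pre_ = exactly the inputs on which A returns: the board contains the blank 0 (else
-- s.index(0) raises ValueError), and every candidate swap index that passes the '0<=nz<9'
-- test is inside the list (else the swap raises IndexError).
def Pre_prefer_corner_moves (node : List Int) : Prop :=
  (0 : Int) ∈ node ∧
  (node.idxOf (0 : Int) + 3 < 9 → node.idxOf (0 : Int) + 3 < node.length) ∧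
  (node.idxOf (0 : Int) + 1 < 9 ∧ node.idxOf (0 : Int) % 3 ≠ 2 → node.idxOf (0 : Int) + 1 < node.length)
instance (node : List Int) : Decidable (Pre_prefer_corner_moves node) := by
  unfold Pre_prefer_corner_moves; infer_instance

def pvWitness_prefer_corner_moves : List Int := [1, 2, 3, 4, 0, 5, 6, 7, 8]

def Spec_prefer_corner_moves (node : List Int) (out : List (List Int)) : Prop := out = prefer_corner_moves_alt node
instance (node : List Int) (out : List (List Int)) : Decidable (Spec_prefer_corner_moves node out) := by unfold Spec_prefer_corner_moves; infer_instance

-- ===== CLAIM (what is proved, stated in full; the proofs are below) =====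
def Claim_equal_prefer_corner_moves : Prop := ∀ (node : List Int), Dom_prefer_corner_moves node → Pre_prefer_corner_moves node → Spec_prefer_corner_moves node (prefer_corner_moves node)

-- ===== LEMMAS AND PROOFS =====

-- the bucket predicate: does the successor's blank sit on a corner?
def pvIsCorner (s : List Int) : Bool :=
  decide (pvBlank s = 0 ∨ pvBlank s = 2 ∨ pvBlank s = 6 ∨ pvBlank s = 8)

lemma pvScore_eq (s : List Int) :
    (if pvBlank s ∈ (PySem.Set.ofList [0, 2, 6, 8] : PySem.Set Int) then (0 : Int) else 1)
      = if pvIsCorner s then 0 else 1 := by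
  simp [PySem.Set.mem_ofList, pvIsCorner]

-- inserting a 0-key element into zeros ++ ones lands between the buckets
lemma pvInsertBy_zero (x : Int × List Int) (hx : x.1 = 0)
    (zs os : List (Int × List Int)) (hz : ∀ p ∈ zs, p.1 = 0) (ho : ∀ p ∈ os, p.1 = (1 : Int)) :
    PySem.List.insertBy (fun a b => decide (a.1 < b.1)) x (zs ++ os) = zs ++ x :: os := by
  induction zs with
  | nil =>
    cases os with
    | nil => rfl
    | cons o os' =>
      have h1 : o.1 = 1 := ho o (by simp)
      simp [PySem.List.insertBy, hx, h1]
  | cons z zs' ih =>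
    have hz0 : z.1 = 0 := hz z (by simp)
    simp only [List.cons_append, PySem.List.insertBy, hx, hz0]
    simp only [show ¬((0:Int) < 0) by omega, decide_false]
    simp [ih (fun p hp => hz p (by simp [hp]))]

-- inserting a 1-key element into zeros ++ ones appends at the end
lemma pvInsertBy_one (x : Int × List Int) (hx : x.1 = 1)
    (zs os : List (Int × List Int)) (hz : ∀ p ∈ zs, p.1 = 0) (ho : ∀ p ∈ os, p.1 = (1 : Int)) :
    PySem.List.insertBy (fun a b => decide (a.1 < b.1)) x (zs ++ os) = (zs ++ os) ++ [x] := by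
  apply PySem.List.insertBy_of_forall_not_before
  intro y hy
  rcases List.mem_append.mp hy with h | h
  · have := hz y h; simp [hx, this]
  · have := ho y h; simp [hx, this]

-- A's stable insertion sort over 0/1 keys is exactly the two-bucket partition
lemma pvFoldlIns (l : List (Int × List Int)) (hl : ∀ p ∈ l, p.1 = 0 ∨ p.1 = 1)
    (zs os : List (Int × List Int)) (hz : ∀ p ∈ zs, p.1 = 0) (ho : ∀ p ∈ os, p.1 = (1 : Int)) :
    l.foldl (fun acc x => PySem.List.insertBy (fun a b => decide (a.1 < b.1)) x acc) (zs ++ os)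
      = (zs ++ l.filter (fun p => p.1 = 0)) ++ (os ++ l.filter (fun p => p.1 ≠ 0)) := by
  induction l generalizing zs os with
  | nil => simp
  | cons x t ih =>
    rcases hl x (by simp) with hx | hx
    · rw [List.foldl_cons, pvInsertBy_zero x hx zs os hz ho,
        show zs ++ x :: os = (zs ++ [x]) ++ os by simp,
        ih (fun p hp => hl p (by simp [hp]))
          (zs ++ [x]) os
          (fun p hp => by rcases List.mem_append.mp hp with h | h
                          · exact hz p h
                          · simp at h; simp [h, hx]) ho]
      simp [hx]
    · rw [List.foldl_cons, pvInsertBy_one x hx zs os hz ho,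
        show (zs ++ os) ++ [x] = zs ++ (os ++ [x]) by simp,
        ih (fun p hp => hl p (by simp [hp]))
          zs (os ++ [x]) hz
          (fun p hp => by rcases List.mem_append.mp hp with h | h
                          · exact ho p h
                          · simp at h; simp [h, hx])]
      simp [hx]

-- B's fold is the same partition
lemma pvFoldB (l : List (List Int)) (a b : List (List Int)) :
    (l.foldl (fun (acc : List (List Int) × List (List Int)) s =>
        if pvBlank s = 0 ∨ pvBlank s = 2 ∨ pvBlank s = 6 ∨ pvBlank s = 8
        then (acc.1 ++ [s], acc.2)
        else (acc.1, acc.2 ++ [s])) (a, b))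
      = (a ++ l.filter pvIsCorner, b ++ l.filter (fun s => !pvIsCorner s)) := by
  induction l generalizing a b with
  | nil => simp
  | cons x t ih =>
    by_cases hx : pvBlank x = 0 ∨ pvBlank x = 2 ∨ pvBlank x = 6 ∨ pvBlank x = 8
    · simp only [List.foldl_cons, if_pos hx, ih, List.filter_cons,
        show pvIsCorner x = true by simp [pvIsCorner]; tauto]
      simp
    · simp only [List.foldl_cons, if_neg hx, ih, List.filter_cons,
        show pvIsCorner x = false by simp [pvIsCorner]; tauto]
      simp

lemma pvMain (node : List Int) : prefer_corner_moves node = prefer_corner_moves_alt node := by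
  unfold prefer_corner_moves prefer_corner_moves_alt
  simp only [pvScore_eq, PySem.List.foldl_append_singleton_eq_map
    (fun s => ((if pvIsCorner s then (0 : Int) else 1), s)) (standard_moves node) [],
    List.nil_append, pvFoldB]
  have h := pvFoldlIns ((standard_moves node).map (fun s => ((if pvIsCorner s then (0 : Int) else 1), s)))
      (by intro p hp; simp at hp; rcases hp with ⟨s, _, rfl⟩; by_cases h : pvIsCorner s <;> simp [h])
      [] [] (by simp) (by simp)
  simp only [List.nil_append] at h
  rw [PySem.List.sorted_eq_foldl_insertBy, h]
  simp only [List.map_append, List.filter_map, List.map_map]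
  congr 1
  · rw [List.filter_congr (q := pvIsCorner)
      (fun s _ => by by_cases h : pvIsCorner s <;> simp [Function.comp, h])]
    simp [Function.comp_def]
  · rw [List.filter_congr (q := fun s => !pvIsCorner s)
      (fun s _ => by by_cases h : pvIsCorner s <;> simp [Function.comp, h])]
    simp [Function.comp_def]

-- ===== VERDICT (by name: the statement is the Claim_ definition above) =====
theorem prefer_corner_moves_spec : Claim_equal_prefer_corner_moves := by
  intro node _ _
  exact pvMain node
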